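-- pv_equiv track=rewrite | github.com/stnamjef/algorithms | python3/dna_sequence_alignment.py | opt
-- ===== SOURCE A (Python) =====
-- def opt(X, Y, i, j):
--     m = len(X)
--     n = len(Y)
--     if i == m:
--         opt_val = 2 * (n - j)
--     elif j == n:
--         opt_val = 2 * (m - i)
--     else:
--         if X[i] == Y[j]:
--             penalty = 0
--         else:
--             penalty = 1
--         opt_val = min(opt(X, Y, i + 1, j + 1) + penalty, opt(X, Y, i + 1, j) + 2, opt(X, Y, i, j + 1) + 2)
--     return opt_val
-- ===== SOURCE B (Python) =====
-- def opt(X, Y, i, j):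
--     m = len(X)
--     n = len(Y)
--     if i == m:
--         return 2 * (n - j)
--     if j == n:
--         return 2 * (m - i)
--     # bottom-up DP: row holds the optimal costs for the current ii over jj = j..n
--     row = [2 * (n - jj) for jj in range(j, n + 1)]  # ii = m
--     ii = m - 1
--     while ii >= i:
--         new = [0] * (n + 1 - j)
--         new[n - j] = 2 * (m - ii)
--         jj = n - 1
--         while jj >= j:
--             p = 0 if X[ii] == Y[jj] else 1
--             new[jj - j] = min(row[jj + 1 - j] + p, row[jj - j] + 2, new[jj + 1 - j] + 2)
--             jj -= 1
--         row = new
--         ii -= 1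
--     return row[0]
-- ===== Notes on version B (the rewrite author's own statement) =====
-- stated objective: alternative
-- what changed: Replaced A's plain three-way recursion with an iterative bottom-up dynamic program that fills a rolling one-dimensional row from ii = m down to i, so each (ii,jj) subproblem is computed once.
import Mathlib
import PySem

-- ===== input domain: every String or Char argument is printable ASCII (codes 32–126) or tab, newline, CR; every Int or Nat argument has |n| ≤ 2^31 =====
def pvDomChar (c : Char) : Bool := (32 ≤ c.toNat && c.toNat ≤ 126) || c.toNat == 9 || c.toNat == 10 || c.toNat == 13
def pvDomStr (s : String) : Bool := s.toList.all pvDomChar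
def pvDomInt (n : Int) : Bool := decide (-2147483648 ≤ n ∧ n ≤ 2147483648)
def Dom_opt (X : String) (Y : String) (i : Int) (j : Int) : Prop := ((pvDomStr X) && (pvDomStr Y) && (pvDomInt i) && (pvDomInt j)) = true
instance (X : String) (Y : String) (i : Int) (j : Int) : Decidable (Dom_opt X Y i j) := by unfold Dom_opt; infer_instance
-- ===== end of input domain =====

-- B replaces A's three-way recursion by an iterative bottom-up DP over a rolling row; return value only.

-- ===== PORT A =====
-- A's recursion, made total with a fuel counter (fuel only makes the same computation
-- total; it is large enough on every input Pre_opt admits, see optF_stab below).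
def optF (X : List Char) (Y : List Char) (m : Int) (n : Int) :
    Nat → Int → Int → Int
  | 0, i, j =>
    if i = m then 2 * (n - j)
    else if j = n then 2 * (m - i)
    else 0   -- never reached on inputs Pre_opt admits
  | f + 1, i, j =>
    if i = m then 2 * (n - j)
    else if j = n then 2 * (m - i)
    else
        let penalty : Int := if PySem.List.pyGet? X i = PySem.List.pyGet? Y j then 0 else 1
        min (min (optF X Y m n f (i + 1) (j + 1) + penalty)
                 (optF X Y m n f (i + 1) j + 2))
            (optF X Y m n f i (j + 1) + 2)

def opt (X : String) (Y : String) (i : Int) (j : Int) : Int :=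
  optF X.toList Y.toList (X.toList.length : Int) (Y.toList.length : Int)
    (((X.toList.length : Int) - i).toNat + ((Y.toList.length : Int) - j).toNat) i j

-- ===== PORT B =====
-- Source B's inner 'while jj >= j' loop: given the previous row (costs for ii+1, positions
-- jj..n), produce the new row (costs for ii); the new row is built right to left, which
-- is structural recursion on the old row's tail.
def stepRow (X : List Char) (Y : List Char) (m : Int) (ii : Int) :
    Int → List Int → List Int
  | _, [] => []                    -- not reached: the row always spans jj..n, nonempty
  | _, [_] => [2 * (m - ii)]       -- position jj = n: new[n-j] = 2*(m-ii)
  | jj, r :: rest =>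
      let newRest := stepRow X Y m ii (jj + 1) rest
      let p : Int := if PySem.List.pyGet? X ii = PySem.List.pyGet? Y jj then 0 else 1
      min (min (rest.headI + p) (r + 2)) (newRest.headI + 2) :: newRest

-- Source B's outer 'while ii >= i' loop, running k = m - i times from ii = m - 1 downward
def outerLoop (X : List Char) (Y : List Char) (m : Int) (j : Int) :
    Nat → Int → List Int → List Int
  | 0, _, row => row
  | k + 1, ii, row => outerLoop X Y m j k (ii - 1) (stepRow X Y m ii j row)

def opt_alt (X : String) (Y : String) (i : Int) (j : Int) : Int :=
  let m : Int := (X.toList.length : Int)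
  let n : Int := (Y.toList.length : Int)
  if i = m then 2 * (n - j)
  else if j = n then 2 * (m - i)
  else
    let row0 := (PySem.List.pyRange j (n + 1) 1).map (fun jj => 2 * (n - jj))
    (outerLoop X.toList Y.toList m j (m - i).toNat (m - 1) row0).headI

-- ===== PRECONDITION & SPEC =====
-- Pre_opt is exactly the set of inputs on which the Python A returns normally: the two
-- shortcut lines i = len(X) / j = len(Y), and both indices inside Python's (negative-
-- index-wrapping) range; everywhere else A raises IndexError.
def Pre_opt (X : String) (Y : String) (i : Int) (j : Int) : Prop :=
  i = (X.toList.length : Int) ∨ j = (Y.toList.length : Int) ∨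
    (-(X.toList.length : Int) ≤ i ∧ i < (X.toList.length : Int) ∧
     -(Y.toList.length : Int) ≤ j ∧ j < (Y.toList.length : Int))
instance (X : String) (Y : String) (i : Int) (j : Int) : Decidable (Pre_opt X Y i j) := by
  unfold Pre_opt; infer_instance

def pvWitness_opt : String × String × Int × Int := ("ACGT", "AGT", 1, 0)

def Spec_opt (X : String) (Y : String) (i : Int) (j : Int) (out : Int) : Prop := out = opt_alt X Y i j
instance (X : String) (Y : String) (i : Int) (j : Int) (out : Int) : Decidable (Spec_opt X Y i j out) := by unfold Spec_opt; infer_instance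

-- ===== CLAIM (what is proved, stated in full; the proofs are below) =====
def Claim_equal_opt : Prop := ∀ (X : String) (Y : String) (i : Int) (j : Int), Dom_opt X Y i j → Pre_opt X Y i j → Spec_opt X Y i j (opt X Y i j)

-- ===== LEMMAS AND PROOFS =====

-- the depth bound used as fuel on the A side
def mu (X : List Char) (Y : List Char) (i : Int) (j : Int) : Nat :=
  ((X.length : Int) - i).toNat + ((Y.length : Int) - j).toNat

-- the common value both ports compute: A's recursion run with exactly enough fuel
def F (X : List Char) (Y : List Char) (i : Int) (j : Int) : Int :=
  optF X Y (X.length : Int) (Y.length : Int) (mu X Y i j) i j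

-- Pre_opt over char lists
def PreL (X : List Char) (Y : List Char) (i : Int) (j : Int) : Prop :=
  i = (X.length : Int) ∨ j = (Y.length : Int) ∨
    (-(X.length : Int) ≤ i ∧ i < (X.length : Int) ∧
     -(Y.length : Int) ≤ j ∧ j < (Y.length : Int))

theorem PreL_steps (X Y : List Char) (i j : Int) (h : PreL X Y i j)
    (hi : i ≠ (X.length : Int)) (hj : j ≠ (Y.length : Int)) :
    PreL X Y (i + 1) (j + 1) ∧ PreL X Y (i + 1) j ∧ PreL X Y i (j + 1) ∧
      2 ≤ mu X Y i j ∧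
      mu X Y (i + 1) (j + 1) = mu X Y i j - 2 ∧
      mu X Y (i + 1) j = mu X Y i j - 1 ∧
      mu X Y i (j + 1) = mu X Y i j - 1 := by
  unfold PreL mu at *
  omega

theorem optF_base1 (X Y : List Char) (fuel : Nat) (i j : Int)
    (hi : i = (X.length : Int)) :
    optF X Y (X.length : Int) (Y.length : Int) fuel i j = 2 * ((Y.length : Int) - j) := by
  cases fuel <;> rw [optF, if_pos hi]

theorem optF_base2 (X Y : List Char) (fuel : Nat) (i j : Int)
    (hi : ¬ i = (X.length : Int)) (hj : j = (Y.length : Int)) :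
    optF X Y (X.length : Int) (Y.length : Int) fuel i j = 2 * ((X.length : Int) - i) := by
  cases fuel <;> rw [optF, if_neg hi, if_pos hj]

theorem F_base1 (X Y : List Char) (i j : Int) (hi : i = (X.length : Int)) :
    F X Y i j = 2 * ((Y.length : Int) - j) := by
  unfold F; exact optF_base1 X Y _ i j hi

theorem F_base2 (X Y : List Char) (i j : Int)
    (hi : ¬ i = (X.length : Int)) (hj : j = (Y.length : Int)) :
    F X Y i j = 2 * ((X.length : Int) - i) := by
  unfold F; exact optF_base2 X Y _ i j hi hj

theorem optF_succ (X Y : List Char) (f : Nat) (i j : Int)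
    (hi : ¬ i = (X.length : Int)) (hj : ¬ j = (Y.length : Int)) :
    optF X Y (X.length : Int) (Y.length : Int) (f + 1) i j =
      min (min (optF X Y (X.length : Int) (Y.length : Int) f (i + 1) (j + 1) +
            (if PySem.List.pyGet? X i = PySem.List.pyGet? Y j then (0 : Int) else 1))
          (optF X Y (X.length : Int) (Y.length : Int) f (i + 1) j + 2))
        (optF X Y (X.length : Int) (Y.length : Int) f i (j + 1) + 2) := by
  rw [optF, if_neg hi, if_neg hj]

theorem optF_stab (X Y : List Char) (fuel : Nat) :
    ∀ (i j : Int), PreL X Y i j → mu X Y i j ≤ fuel →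
      optF X Y (X.length : Int) (Y.length : Int) fuel i j = F X Y i j := by
  induction fuel using Nat.strong_induction_on with
  | _ fuel ih =>
    intro i j hpre hf
    by_cases hi : i = (X.length : Int)
    · rw [optF_base1 X Y fuel i j hi, F_base1 X Y i j hi]
    · by_cases hj : j = (Y.length : Int)
      · rw [optF_base2 X Y fuel i j hi hj, F_base2 X Y i j hi hj]
      · obtain ⟨h1, h2, h3, hmu, e1, e2, e3⟩ := PreL_steps X Y i j hpre hi hj
        obtain ⟨f, rfl⟩ : ∃ f, fuel = f + 1 := ⟨fuel - 1, by omega⟩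
        obtain ⟨g, hg⟩ : ∃ g, mu X Y i j = g + 1 := ⟨mu X Y i j - 1, by omega⟩
        rw [optF_succ X Y f i j hi hj]
        conv_rhs => rw [F, hg]
        rw [optF_succ X Y g i j hi hj]
        rw [ih f (by omega) _ _ h1 (by omega), ih f (by omega) _ _ h2 (by omega),
            ih f (by omega) _ _ h3 (by omega),
            ih g (by omega) _ _ h1 (by omega), ih g (by omega) _ _ h2 (by omega),
            ih g (by omega) _ _ h3 (by omega)]

-- one unfolding of F on the recursive branch
theorem F_rec (X Y : List Char) (i j : Int) (h : PreL X Y i j)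
    (hi : i ≠ (X.length : Int)) (hj : j ≠ (Y.length : Int)) :
    F X Y i j =
      min (min (F X Y (i + 1) (j + 1) +
            (if PySem.List.pyGet? X i = PySem.List.pyGet? Y j then (0 : Int) else 1))
          (F X Y (i + 1) j + 2)) (F X Y i (j + 1) + 2) := by
  obtain ⟨h1, h2, h3, hmu, e1, e2, e3⟩ := PreL_steps X Y i j h hi hj
  obtain ⟨g, hg⟩ : ∃ g, mu X Y i j = g + 1 := ⟨mu X Y i j - 1, by omega⟩
  conv_lhs => rw [F, hg]
  rw [optF_succ X Y g i j hi hj]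
  rw [optF_stab X Y g _ _ h1 (by omega), optF_stab X Y g _ _ h2 (by omega),
      optF_stab X Y g _ _ h3 (by omega)]

-- the row of F-values at fixed first index ii, over positions jj..n
def rowOf (X Y : List Char) (ii : Int) (jj : Int) : List Int :=
  (PySem.List.pyRange jj ((Y.length : Int) + 1) 1).map (fun q => F X Y ii q)

theorem rowOf_cons (X Y : List Char) (ii jj : Int) (h : jj ≤ (Y.length : Int)) :
    rowOf X Y ii jj = F X Y ii jj :: rowOf X Y ii (jj + 1) := by
  rw [rowOf, PySem.List.pyRange_one_cons (by omega), List.map_cons]; rfl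

theorem rowOf_last (X Y : List Char) (ii : Int) :
    rowOf X Y ii (Y.length : Int) = [F X Y ii (Y.length : Int)] := by
  rw [rowOf_cons X Y ii _ (le_refl _), rowOf,
      PySem.List.pyRange_one_eq_nil (by omega), List.map_nil]

theorem rowOf_headI (X Y : List Char) (ii jj : Int) (h : jj ≤ (Y.length : Int)) :
    (rowOf X Y ii jj).headI = F X Y ii jj := by
  rw [rowOf_cons X Y ii jj h]; rfl

theorem stepRow_spec (X Y : List Char) (ii : Int)
    (hii1 : -(X.length : Int) ≤ ii) (hii2 : ii < (X.length : Int)) :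
    ∀ (k : Nat) (jj : Int), -(Y.length : Int) ≤ jj →
      jj + k = (Y.length : Int) →
      stepRow X Y (X.length : Int) ii jj (rowOf X Y (ii + 1) jj) = rowOf X Y ii jj := by
  intro k
  induction k with
  | zero =>
      intro jj hjl hje
      have hje' : jj = (Y.length : Int) := by omega
      subst hje'
      rw [rowOf_last, rowOf_last, stepRow,
          F_base2 X Y ii _ (by omega) rfl]
  | succ k ih =>
      intro jj hjl hje
      have hjlt : jj < (Y.length : Int) := by omega
      have h1 : rowOf X Y (ii + 1) jj = F X Y (ii + 1) jj :: rowOf X Y (ii + 1) (jj + 1) :=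
        rowOf_cons X Y (ii + 1) jj (by omega)
      have h2 : rowOf X Y (ii + 1) (jj + 1) =
          F X Y (ii + 1) (jj + 1) :: rowOf X Y (ii + 1) (jj + 1 + 1) :=
        rowOf_cons X Y (ii + 1) (jj + 1) (by omega)
      have hrec := ih (jj + 1) (by omega) (by omega)
      have hpre : PreL X Y ii jj := Or.inr (Or.inr ⟨hii1, hii2, hjl, hjlt⟩)
      rw [h1, h2, stepRow, ← h2, hrec,
          rowOf_headI X Y (ii + 1) (jj + 1) (by omega),
          rowOf_headI X Y ii (jj + 1) (by omega),
          rowOf_cons X Y ii jj (by omega)]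
      congr 1
      · exact (F_rec X Y ii jj hpre (by omega) (by omega)).symm
      · intro h
        simp at h

theorem outerLoop_spec (X Y : List Char) (j : Int)
    (hjl : -(Y.length : Int) ≤ j) (hjr : j ≤ (Y.length : Int)) :
    ∀ (k : Nat) (ii : Int), -(X.length : Int) ≤ ii - k + 1 → ii < (X.length : Int) →
      outerLoop X Y (X.length : Int) j k ii (rowOf X Y (ii + 1) j) =
        rowOf X Y (ii + 1 - k) j := by
  intro k
  induction k with
  | zero =>
      intro ii _ _
      rw [outerLoop]
      congr 1
      omega
  | succ k ih =>
      intro ii hlo hhi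
      rw [outerLoop,
          stepRow_spec X Y ii (by omega) hhi ((Y.length : Int) - j).toNat j hjl (by omega)]
      have : rowOf X Y ii j = rowOf X Y ((ii - 1) + 1) j := by norm_num
      rw [this, ih (ii - 1) (by omega) (by omega)]
      congr 1
      omega

theorem opt_eq_F (X : String) (Y : String) (i : Int) (j : Int) :
    opt X Y i j = F X.toList Y.toList i j := rfl

theorem opt_alt_eq_F (X : String) (Y : String) (i : Int) (j : Int)
    (h : Pre_opt X Y i j) : opt_alt X Y i j = F X.toList Y.toList i j := by
  unfold opt_alt
  by_cases hi : i = (X.toList.length : Int)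
  · rw [if_pos hi, F_base1 X.toList Y.toList i j hi]
  · rw [if_neg hi]
    by_cases hj : j = (Y.toList.length : Int)
    · rw [if_pos hj, F_base2 X.toList Y.toList i j hi hj]
    · rw [if_neg hj]
      obtain ⟨hil, hir, hjl, hjr⟩ :
          -(X.toList.length : Int) ≤ i ∧ i < (X.toList.length : Int) ∧
          -(Y.toList.length : Int) ≤ j ∧ j < (Y.toList.length : Int) := by
        rcases h with h | h | h
        · exact absurd h hi
        · exact absurd h hj
        · exact h
      have hrow0 : (PySem.List.pyRange j ((Y.toList.length : Int) + 1) 1).map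
          (fun jj => 2 * ((Y.toList.length : Int) - jj)) =
          rowOf X.toList Y.toList (X.toList.length : Int) j := by
        unfold rowOf
        refine List.map_congr_left (fun q _ => ?_)
        rw [F_base1 X.toList Y.toList _ q rfl]
      simp only
      rw [hrow0]
      have hm1 : rowOf X.toList Y.toList (X.toList.length : Int) j =
          rowOf X.toList Y.toList (((X.toList.length : Int) - 1) + 1) j := by norm_num
      rw [hm1, outerLoop_spec X.toList Y.toList j hjl (by omega)
            ((X.toList.length : Int) - i).toNat ((X.toList.length : Int) - 1)
            (by omega) (by omega)]
      have hidx : (X.toList.length : Int) - 1 + 1 - ((X.toList.length : Int) - i).toNat = i := by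
        omega
      rw [hidx, rowOf_cons X.toList Y.toList i j (by omega)]
      simp only [List.headI_cons]

-- ===== VERDICT (by name: the statement is the Claim_ definition above) =====
theorem opt_spec : Claim_equal_opt := by
  intro X Y i j _ hpre
  unfold Spec_opt
  rw [opt_eq_F, opt_alt_eq_F X Y i j hpre]
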